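-- pv_equiv track=rewrite | github.com/fabianvera728/semantic-search-system | search-service/src/infrastructure/embedding/optimized_embedding_strategy.py | _create_smart_batches
-- ===== SOURCE A (Python) =====
-- from typing import List, Dict, Any, Optional, Union, Tuple
--
-- def _create_smart_batches(texts: List[str], batch_size: int) -> List[List[str]]:
--     """Crea lotes inteligentes agrupando textos similares en longitud"""
--
--     # Ordenar textos por longitud para mejor eficiencia
--     text_length_pairs = [(text, len(text)) for text in texts]
--     text_length_pairs.sort(key=lambda x: x[1])
--
--     batches = []
--     current_batch = []
--
--     for text, length in text_length_pairs:
--         current_batch.append(text)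
--
--         if len(current_batch) >= batch_size:
--             batches.append(current_batch)
--             current_batch = []
--
--     # Agregar lote final si no está vacío
--     if current_batch:
--         batches.append(current_batch)
--
--     return batches
-- ===== SOURCE B (Python) =====
-- def _create_smart_batches(texts, batch_size):
--     ordered = sorted(texts, key=len)
--     step = max(batch_size, 1)
--     return [ordered[i:i + step] for i in range(0, len(ordered), step)]
-- ===== Notes on version B (the rewrite author's own statement) =====
-- stated objective: simpler
-- what changed: B sorts the texts once with key=len and derives each batch by index-range slicing (ordered[i:i+step] for i in range(0, n, step), step = max(batch_size, 1)), replacing A's (text, len) pair list, pair sort, and append/flush accumulator loop with a running current_batch.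
import Mathlib
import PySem

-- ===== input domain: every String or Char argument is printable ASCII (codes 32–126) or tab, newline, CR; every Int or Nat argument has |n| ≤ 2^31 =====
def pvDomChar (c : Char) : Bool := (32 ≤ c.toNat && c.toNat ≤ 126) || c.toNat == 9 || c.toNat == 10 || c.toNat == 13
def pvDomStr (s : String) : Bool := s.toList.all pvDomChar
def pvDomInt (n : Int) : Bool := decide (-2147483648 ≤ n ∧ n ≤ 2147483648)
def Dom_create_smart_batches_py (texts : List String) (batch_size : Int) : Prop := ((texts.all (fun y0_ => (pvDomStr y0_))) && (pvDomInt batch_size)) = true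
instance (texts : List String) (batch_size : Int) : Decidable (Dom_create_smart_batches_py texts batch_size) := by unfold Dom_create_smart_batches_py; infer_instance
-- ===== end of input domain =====

-- B sorts once with key=len and builds each batch by index-range slicing with step
-- max(batch_size, 1), instead of A's append/flush accumulator loop; objective: simpler.

-- ===== PORT A =====
def create_smart_batches_py (texts : List String) (batch_size : Int) : List (List String) :=
  let text_length_pairs := texts.map (fun text => (text, (PySem.Str.len text : Int)))
  let sorted_pairs := PySem.List.sorted text_length_pairs (fun x => x.2)
  let r := sorted_pairs.foldl
    (fun (st : List (List String) × List String) p =>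
      if batch_size ≤ ((st.2 ++ [p.1]).length : Int) then (st.1 ++ [st.2 ++ [p.1]], [])
      else (st.1, st.2 ++ [p.1]))
    ([], [])
  if r.2 ≠ [] then r.1 ++ [r.2] else r.1

-- ===== PORT B =====
def create_smart_batches_py_alt (texts : List String) (batch_size : Int) : List (List String) :=
  let ordered := PySem.List.sorted texts (fun t => (PySem.Str.len t : Int))
  let step := max batch_size 1
  (PySem.List.pyRange 0 (ordered.length : Int) step).map
    (fun i => PySem.List.slice ordered (some i) (some (i + step)))

-- ===== PRECONDITION & SPEC =====
def Spec_create_smart_batches_py (texts : List String) (batch_size : Int) (out : List (List String)) : Prop := out = create_smart_batches_py_alt texts batch_size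
instance (texts : List String) (batch_size : Int) (out : List (List String)) : Decidable (Spec_create_smart_batches_py texts batch_size out) := by unfold Spec_create_smart_batches_py; infer_instance

-- ===== CLAIM (what is proved, stated in full; the proofs are below) =====
def Claim_equal_create_smart_batches_py : Prop := ∀ (texts : List String) (batch_size : Int), Dom_create_smart_batches_py texts batch_size → Spec_create_smart_batches_py texts batch_size (create_smart_batches_py texts batch_size)

-- ===== LEMMAS AND PROOFS =====

-- the common value both programs compute: chunks of size s+1 (last one possibly shorter)
def pvChunk (s : Nat) : List String → List (List String)
  | [] => []
  | y :: t => (y :: t.take s) :: pvChunk s (t.drop s)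
termination_by l => l.length
decreasing_by simp

theorem pvChunk_nil (s : Nat) : pvChunk s [] = [] := by rw [pvChunk]

theorem pvChunk_cons_full (s : Nat) (c ys : List String) (hc : c.length = s + 1) :
    pvChunk s (c ++ ys) = c :: pvChunk s ys := by
  cases c with
  | nil => simp at hc
  | cons y t =>
    have ht : t.length = s := by simpa using hc
    rw [List.cons_append, pvChunk,
        List.take_append_of_le_length (by omega), List.drop_append_of_le_length (by omega)]
    simp [List.take_of_length_le ht.le, List.drop_of_length_le ht.le]

-- map fst commutes with A's insertion when every stored pair carries its own length
theorem map_fst_insertBy (t : String) (l : List (String × Int))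
    (h : ∀ p ∈ l, p.2 = (PySem.Str.len p.1 : Int)) :
    (PySem.List.insertBy (fun a b => decide (a.2 < b.2)) (t, (PySem.Str.len t : Int)) l).map Prod.fst
      = PySem.List.insertBy (fun a b => decide ((PySem.Str.len a : Int) < (PySem.Str.len b : Int))) t (l.map Prod.fst) := by
  induction l with
  | nil => simp [PySem.List.insertBy]
  | cons p l ih =>
    have hp : p.2 = (PySem.Str.len p.1 : Int) := h p (by simp)
    simp only [PySem.List.insertBy, hp, List.map_cons]
    split
    · simp
    · simp only [List.map_cons]
      rw [ih (fun q hq => h q (by simp [hq]))]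

theorem foldl_ins (xs : List String) (acc : List (String × Int))
    (h : ∀ p ∈ acc, p.2 = (PySem.Str.len p.1 : Int)) :
    (xs.foldl (fun a t => PySem.List.insertBy (fun a b => decide (a.2 < b.2)) (t, (PySem.Str.len t : Int)) a) acc).map Prod.fst
      = xs.foldl (fun a t => PySem.List.insertBy (fun a b => decide ((PySem.Str.len a : Int) < (PySem.Str.len b : Int))) t a) (acc.map Prod.fst) := by
  induction xs generalizing acc with
  | nil => simp
  | cons x xs ih =>
    simp only [List.foldl_cons]
    rw [ih _ (fun q hq => ?_), map_fst_insertBy x acc h]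
    rcases (PySem.List.mem_insertBy _ _ _ _).1 hq with h1 | h2
    · simp [h1]
    · exact h q h2

theorem sorted_pairs_fst (xs : List String) :
    (PySem.List.sorted (xs.map (fun t => (t, (PySem.Str.len t : Int)))) (fun x => x.2)).map Prod.fst
      = PySem.List.sorted xs (fun t => (PySem.Str.len t : Int)) := by
  rw [PySem.List.sorted_eq_foldl_insertBy, PySem.List.sorted_eq_foldl_insertBy, List.foldl_map]
  simpa using foldl_ins xs [] (by simp)

-- A's accumulator loop followed by the final flush produces exactly the chunks of cur ++ ys
theorem loopA (bs : Int) (s : Nat) (hbs : max bs 1 = ((s : Int) + 1))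
    (ys : List String) (acc : List (List String)) (cur : List String) (hc : cur.length ≤ s) :
    (if (ys.foldl (fun (st : List (List String) × List String) x =>
          if bs ≤ ((st.2 ++ [x]).length : Int) then (st.1 ++ [st.2 ++ [x]], []) else (st.1, st.2 ++ [x]))
          (acc, cur)).2 ≠ []
      then (ys.foldl (fun (st : List (List String) × List String) x =>
          if bs ≤ ((st.2 ++ [x]).length : Int) then (st.1 ++ [st.2 ++ [x]], []) else (st.1, st.2 ++ [x]))
          (acc, cur)).1
          ++ [(ys.foldl (fun (st : List (List String) × List String) x =>
          if bs ≤ ((st.2 ++ [x]).length : Int) then (st.1 ++ [st.2 ++ [x]], []) else (st.1, st.2 ++ [x]))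
          (acc, cur)).2]
      else (ys.foldl (fun (st : List (List String) × List String) x =>
          if bs ≤ ((st.2 ++ [x]).length : Int) then (st.1 ++ [st.2 ++ [x]], []) else (st.1, st.2 ++ [x]))
          (acc, cur)).1)
      = acc ++ pvChunk s (cur ++ ys) := by
  induction ys generalizing acc cur with
  | nil =>
    simp only [List.foldl_nil, List.append_nil]
    cases cur with
    | nil => simp [pvChunk_nil]
    | cons y t =>
      have ht : t.length ≤ s := by simp at hc; omega
      rw [pvChunk]
      simp [List.take_of_length_le ht, List.drop_of_length_le ht, pvChunk_nil]
  | cons y ys ih =>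
    simp only [List.foldl_cons]
    by_cases hfull : (cur ++ [y]).length = s + 1
    · have hb : bs ≤ (((cur ++ [y]).length : Nat) : Int) := by
        simp only [List.length_append, List.length_cons, List.length_nil] at hfull ⊢; omega
      rw [if_pos hb, ih (acc ++ [cur ++ [y]]) [] (by simp)]
      rw [show cur ++ y :: ys = (cur ++ [y]) ++ ys by simp, pvChunk_cons_full s _ _ hfull]
      simp
    · have hlt : (cur ++ [y]).length ≤ s := by
        simp only [List.length_append, List.length_cons, List.length_nil] at hfull ⊢; omega
      have hb : ¬ bs ≤ (((cur ++ [y]).length : Nat) : Int) := by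
        simp only [List.length_append, List.length_cons, List.length_nil] at hfull hlt ⊢; omega
      rw [if_neg hb, ih acc (cur ++ [y]) hlt]
      simp

-- B's index-range slicing, in Nat form, produces the same chunks
theorem rangeChunk (s : Nat) (ys : List String) :
    (List.range ((ys.length + s) / (s + 1))).map (fun k => ((ys.drop ((s+1)*k)).take (s+1)))
      = pvChunk s ys := by
  induction ys using pvChunk.induct s with
  | case1 => simp [pvChunk_nil, Nat.div_eq_of_lt (Nat.lt_succ_self s)]
  | case2 y t ih =>
    have hlen : (t.drop s).length = t.length - s := by simp
    have hm : ((y :: t).length + s) / (s + 1) = ((t.drop s).length + s) / (s + 1) + 1 := by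
      rcases Nat.lt_or_ge t.length (s+1) with h | h
      · rw [List.length_cons,
            show t.length + 1 + s = t.length + (s + 1) by omega,
            Nat.add_div_right _ (Nat.succ_pos s),
            Nat.div_eq_of_lt (by omega : t.length < s + 1),
            Nat.div_eq_of_lt (by omega : (t.drop s).length + s < s + 1)]
      · rw [List.length_cons,
            show t.length + 1 + s = t.length + (s + 1) by omega,
            Nat.add_div_right _ (Nat.succ_pos s),
            show (t.drop s).length + s = t.length - (s + 1) + (s + 1) by omega,
            Nat.add_div_right _ (Nat.succ_pos s)]
        congr 1
        conv_lhs => rw [show t.length = t.length - (s+1) + (s+1) by omega]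
        rw [Nat.add_div_right _ (Nat.succ_pos s)]
    rw [hm, List.range_succ_eq_map, List.map_cons, List.map_map, pvChunk]
    refine congrArg₂ List.cons (by simp) ?_
    simp only [List.length_drop] at ih ⊢
    rw [← ih]
    refine List.map_congr_left (fun k _ => ?_)
    simp only [Function.comp_apply, Nat.succ_eq_add_one]
    rw [show (s+1)*(k+1) = (s + (s+1)*k) + 1 by ring, List.drop_succ_cons, List.drop_drop]

theorem chunkB (bs : Int) (s : Nat) (hbs : max bs 1 = ((s : Int) + 1)) (ys : List String) :
    (PySem.List.pyRange 0 (ys.length : Int) (max bs 1)).map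
      (fun i => PySem.List.slice ys (some i) (some (i + max bs 1))) = pvChunk s ys := by
  rw [hbs, PySem.List.pyRange_of_pos _ _ (by omega : (0:Int) < (s : Int) + 1)]
  have hcnt : (if (0:Int) < (ys.length : Int) then
      ((((ys.length : Int) - 0 + ((s : Int) + 1) - 1) / ((s : Int) + 1)).toNat) else 0)
      = (ys.length + s) / (s + 1) := by
    rcases Nat.eq_zero_or_pos ys.length with h0 | h0
    · rw [h0]; simp [Nat.div_eq_of_lt (by omega : s < s + 1)]
    · rw [if_pos (by exact_mod_cast h0),
          show (ys.length : Int) - 0 + ((s : Int) + 1) - 1 = ((ys.length + s : Nat) : Int) by push_cast; ring,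
          show ((s : Int) + 1) = ((s + 1 : Nat) : Int) by push_cast; ring,
          ← Int.natCast_ediv, Int.toNat_natCast]
  rw [hcnt, List.map_map, ← rangeChunk s ys]
  refine List.map_congr_left (fun k _ => ?_)
  show PySem.List.slice ys (some (0 + ((s : Int) + 1) * k)) (some (0 + ((s : Int) + 1) * k + ((s : Int) + 1)))
      = (ys.drop ((s+1)*k)).take (s+1)
  rw [show (0 + ((s : Int) + 1) * k) = (((s + 1) * k : Nat) : Int) by push_cast; ring,
      show (((((s + 1) * k : Nat)) : Int) + ((s : Int) + 1)) = (((s + 1) * k : Nat) : Int) + ((s + 1 : Nat) : Int) by push_cast; ring,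
      PySem.List.slice_natCast_add]

-- ===== VERDICT (by name: the statement is the Claim_ definition above) =====
theorem create_smart_batches_py_spec : Claim_equal_create_smart_batches_py := by
  intro texts bs _
  simp only [Spec_create_smart_batches_py, create_smart_batches_py, create_smart_batches_py_alt]
  obtain ⟨s, hs⟩ : ∃ s : Nat, max bs 1 = ((s : Int) + 1) := ⟨(max bs 1).toNat - 1, by omega⟩
  rw [show (PySem.List.sorted (texts.map (fun text => (text, (PySem.Str.len text : Int)))) (fun x => x.2)).foldl
        (fun (st : List (List String) × List String) p =>
          if bs ≤ ((st.2 ++ [p.1]).length : Int) then (st.1 ++ [st.2 ++ [p.1]], []) else (st.1, st.2 ++ [p.1]))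
        ([], [])
      = (PySem.List.sorted texts (fun t => (PySem.Str.len t : Int))).foldl
        (fun (st : List (List String) × List String) x =>
          if bs ≤ ((st.2 ++ [x]).length : Int) then (st.1 ++ [st.2 ++ [x]], []) else (st.1, st.2 ++ [x]))
        ([], [])
      from by rw [← sorted_pairs_fst, List.foldl_map]]
  rw [chunkB bs s hs (PySem.List.sorted texts (fun t => (PySem.Str.len t : Int)))]
  exact loopA bs s hs _ [] [] (by simp)
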